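-- pv_equiv track=rewrite | github.com/zhangyikaii/NJUCS-Course-Material | 计算机程序的构造与解释(Structure and Interpretation of Computer Programs)/Solutions/Homeworks/hw03/hw03.py | missing_digits
-- ===== SOURCE A (Python) =====
-- def missing_digits(n):
--     """Given a number a that is in sorted, increasing order,
--     return the number of missing digits in n. A missing digit is
--     a number between the first and last digit of a that is not in n.
--     >>> missing_digits(1248) # 3, 5, 6, 7
--     4
--     >>> missing_digits(1122) # No missing numbers
--     0
--     >>> missing_digits(123456) # No missing numbers
--     0
--     >>> missing_digits(3558) # 4, 6, 7
--     3
--     >>> missing_digits(4) # No missing numbers between 4 and 4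
--     0
--     >>> from construct_check import check
--     >>> # ban while or for loops
--     >>> check(HW_SOURCE_FILE, 'missing_digits', ['While', 'For'])
--     True
--     """
--     if n < 10:
--         return 0
--     right_first_digit = n % 10
--     right_second_digit = (n // 10) % 10
--     if right_second_digit < right_first_digit:
--         return missing_digits(n // 10) + (right_first_digit - right_second_digit) - 1
--     return missing_digits(n // 10)
-- ===== SOURCE B (Python) =====
-- def missing_digits(n):
--     if n < 10:
--         return 0
--     digits = []
--     while n > 0:
--         digits.append(n % 10)
--         n //= 10
--     return sum(hi - lo - 1 for lo, hi in zip(digits[1:], digits) if lo < hi)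
-- ===== Notes on version B (the rewrite author's own statement) =====
-- stated objective: alternative
-- what changed: replaces A's right-to-left recursion that accumulates the gap at each step with an iterative two-phase version: extract the digit list with a while loop, then sum the gaps of adjacent digit pairs in one zip/sum pass
import Mathlib
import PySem

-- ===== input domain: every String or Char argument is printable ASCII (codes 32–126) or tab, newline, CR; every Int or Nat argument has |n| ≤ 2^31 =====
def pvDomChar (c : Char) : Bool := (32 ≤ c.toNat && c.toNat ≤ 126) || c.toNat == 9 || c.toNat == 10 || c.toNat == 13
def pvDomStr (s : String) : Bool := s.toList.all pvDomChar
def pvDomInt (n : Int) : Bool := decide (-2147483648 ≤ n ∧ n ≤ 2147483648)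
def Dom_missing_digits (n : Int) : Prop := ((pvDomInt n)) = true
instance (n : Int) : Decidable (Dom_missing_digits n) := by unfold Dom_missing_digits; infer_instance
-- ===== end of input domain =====

-- B replaces A's right-to-left recursion with an explicit digit-list extraction plus one
-- zip/sum pass over adjacent digit pairs (alternative decomposition, same cost).

-- ===== PORT A =====
def missing_digits (n : Int) : Int :=
  if h : n < 10 then 0
  else
    let right_first_digit := PySem.Int.mod n 10
    let right_second_digit := PySem.Int.mod (PySem.Int.floordiv n 10) 10
    if right_second_digit < right_first_digit then
      missing_digits (PySem.Int.floordiv n 10) + (right_first_digit - right_second_digit) - 1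
    else
      missing_digits (PySem.Int.floordiv n 10)
termination_by n.toNat
decreasing_by
  all_goals
    rw [PySem.Int.floordiv_eq_ediv_of_pos (by norm_num : (0:Int) < 10)]
    omega

-- ===== PORT B =====
-- the while loop of Source B collecting n % 10 and continuing with n // 10
def pvDigits (n : Int) : List Int :=
  if _h : 0 < n then PySem.Int.mod n 10 :: pvDigits (PySem.Int.floordiv n 10) else []
termination_by n.toNat
decreasing_by
  rw [PySem.Int.floordiv_eq_ediv_of_pos (by norm_num : (0:Int) < 10)]
  omega

def missing_digits_alt (n : Int) : Int :=
  if n < 10 then 0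
  else
    let digits := pvDigits n
    (((PySem.List.slice digits (some 1) none).zip digits).foldl
      (fun acc p => if p.1 < p.2 then acc + (p.2 - p.1 - 1) else acc) 0)

-- ===== PRECONDITION & SPEC =====
def Spec_missing_digits (n : Int) (out : Int) : Prop := out = missing_digits_alt n
instance (n : Int) (out : Int) : Decidable (Spec_missing_digits n out) := by unfold Spec_missing_digits; infer_instance

-- ===== CLAIM (what is proved, stated in full; the proofs are below) =====
def Claim_equal_missing_digits : Prop := ∀ (n : Int), Dom_missing_digits n → Spec_missing_digits n (missing_digits n)

-- ===== LEMMAS AND PROOFS =====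

-- the per-pair gap and the pair sum B computes, in sum-of-map form
def pvGap (p : Int × Int) : Int := if p.1 < p.2 then p.2 - p.1 - 1 else 0

def pvS (l : List Int) : Int := (((l.drop 1).zip l).map pvGap).sum

lemma pvFold_eq_S (l : List Int) :
    ((l.drop 1).zip l).foldl (fun acc p => if p.1 < p.2 then acc + (p.2 - p.1 - 1) else acc) 0
      = pvS l := by
  have h : (fun (acc : Int) (p : Int × Int) => if p.1 < p.2 then acc + (p.2 - p.1 - 1) else acc)
      = fun acc p => acc + pvGap p := by
    funext acc p; simp only [pvGap]; split_ifs <;> simp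
  rw [h, PySem.List.foldl_add, pvS]
  simp

lemma pvS_cons_cons (a b : Int) (t : List Int) :
    pvS (a :: b :: t) = pvGap (b, a) + pvS (b :: t) := by
  simp [pvS]

lemma pvDigits_eq (n : Int) :
    pvDigits n = if 0 < n then n % 10 :: pvDigits (n / 10) else [] := by
  rw [pvDigits]
  split_ifs with h
  · rw [PySem.Int.mod_eq_emod_of_pos (by norm_num : (0:Int) < 10),
        PySem.Int.floordiv_eq_ediv_of_pos (by norm_num : (0:Int) < 10)]
  · rfl

lemma md_lt (n : Int) (h : n < 10) : missing_digits n = 0 := by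
  rw [missing_digits]; simp [h]

lemma md_ge (n : Int) (h : ¬ n < 10) :
    missing_digits n =
      if (n / 10) % 10 < n % 10 then
        missing_digits (n / 10) + (n % 10 - (n / 10) % 10) - 1
      else missing_digits (n / 10) := by
  rw [missing_digits]
  simp only [h, dite_eq_ite]
  rw [PySem.Int.mod_eq_emod_of_pos (by norm_num : (0:Int) < 10),
      PySem.Int.floordiv_eq_ediv_of_pos (by norm_num : (0:Int) < 10),
      PySem.Int.mod_eq_emod_of_pos (by norm_num : (0:Int) < 10)]
  simp

lemma pv_main (n : Int) : missing_digits n = pvS (pvDigits n) := by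
  induction hk : n.toNat using Nat.strong_induction_on generalizing n with
  | _ k ih =>
  by_cases h : n < 10
  · rw [md_lt n h, pvDigits_eq]
    by_cases hp : 0 < n
    · have hz : ¬ (0:Int) < n / 10 := by omega
      rw [pvDigits_eq (n / 10)]
      simp [hp, hz, pvS]
    · simp [hp, pvS]
  · have hq1 : 1 ≤ n / 10 := by omega
    have hqlt : n / 10 < n := by omega
    rw [md_ge n h, pvDigits_eq n, if_pos (show (0:Int) < n by omega)]
    have hcons : pvDigits (n / 10) = (n / 10) % 10 :: pvDigits (n / 10 / 10) := by
      rw [pvDigits_eq (n / 10), if_pos (show (0:Int) < n / 10 by omega)]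
    have ihq : missing_digits (n / 10) = pvS (pvDigits (n / 10)) :=
      ih (n / 10).toNat (by omega) (n / 10) rfl
    rw [hcons, pvS_cons_cons, ← hcons, ihq, pvGap]
    split_ifs with hc <;> ring

lemma pv_alt_eq (n : Int) : missing_digits_alt n = pvS (pvDigits n) := by
  unfold missing_digits_alt
  split_ifs with h
  · by_cases hp : 0 < n
    · have hz : ¬ (0:Int) < n / 10 := by omega
      rw [pvDigits_eq n, pvDigits_eq (n / 10)]
      simp [hp, hz, pvS]
    · rw [pvDigits_eq n]; simp [hp, pvS]
  · change ((PySem.List.slice (pvDigits n) (some 1) none).zip (pvDigits n)).foldl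
        (fun acc p => if p.1 < p.2 then acc + (p.2 - p.1 - 1) else acc) 0 = _
    rw [PySem.List.slice_from_one, ← List.drop_one, pvFold_eq_S]

-- ===== VERDICT (by name: the statement is the Claim_ definition above) =====
theorem missing_digits_spec : Claim_equal_missing_digits := by
  intro n _
  unfold Spec_missing_digits
  rw [pv_main, pv_alt_eq]
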